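-- pv_equiv track=rewrite | github.com/KerimovEmil/ProjectEuler | solutions/PE402.py | twos
-- ===== SOURCE A (Python) =====
-- def twos(max_sum):
--     """Generator of sums of (a+b+c) such that the max integer is exactly 2"""
--     i = 1
--     while i <= max_sum:
--         i += 8
--         if i > max_sum:
--             break
--         yield i
--         i += 4
--         if i > max_sum:
--             break
--         yield i
-- ===== SOURCE B (Python) =====
-- def twos(max_sum):
--     # Closed-form block count instead of a while loop with a running accumulator:
--     # block k contributes 12k+9 and, when it still fits, 12k+13.
--     n1 = (max_sum - 9) // 12 + 1 if max_sum >= 9 else 0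
--     return [v for k in range(n1)
--             for v in ([12 * k + 9] if 12 * k + 13 > max_sum else [12 * k + 9, 12 * k + 13])]
-- ===== Notes on version B (the rewrite author's own statement) =====
-- stated objective: simpler
-- what changed: Replaced the while loop with a mutable running accumulator and two break points by a closed-form block count n1 = (max_sum-9)//12 + 1 and a single comprehension emitting 12k+9 and, when it fits, 12k+13 per block.
import Mathlib
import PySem

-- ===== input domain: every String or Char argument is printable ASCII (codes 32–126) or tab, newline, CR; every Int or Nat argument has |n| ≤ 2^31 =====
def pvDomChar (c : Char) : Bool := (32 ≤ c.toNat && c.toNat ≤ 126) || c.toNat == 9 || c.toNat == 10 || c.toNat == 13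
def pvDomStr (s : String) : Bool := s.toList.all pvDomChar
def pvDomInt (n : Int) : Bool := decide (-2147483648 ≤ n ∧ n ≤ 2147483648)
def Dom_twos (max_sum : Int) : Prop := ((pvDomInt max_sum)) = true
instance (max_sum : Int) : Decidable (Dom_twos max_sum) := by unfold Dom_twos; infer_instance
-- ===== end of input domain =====

-- B replaces A's while-loop with a running accumulator and breaks by a closed-form
-- block count and a per-block comprehension (objective: simpler; equal asymptotic cost).
-- A is a Python generator; the equivalence is about the sequence of yielded values (as a list).

-- ===== PORT A =====
-- the while loop: state i, yields collected in order; breaks port as returning []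
def twosLoopA (max_sum i : Int) : List Int :=
  if _h : i ≤ max_sum then
    -- i += 8; if i > max_sum: break
    if i + 8 > max_sum then []
    else
      -- yield i; i += 4; if i > max_sum: break
      if i + 8 + 4 > max_sum then [i + 8]
      -- yield i; back to the while test with i = old i + 12
      else (i + 8) :: (i + 8 + 4) :: twosLoopA max_sum (i + 8 + 4)
  else []
termination_by (max_sum + 1 - i).toNat
decreasing_by omega

def twos (max_sum : Int) : List Int := twosLoopA max_sum 1

-- ===== PORT B =====
def twos_alt (max_sum : Int) : List Int :=
  let n1 : Int := if max_sum ≥ 9 then PySem.Int.floordiv (max_sum - 9) 12 + 1 else 0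
  (PySem.List.pyRange 0 n1 1).flatMap
    (fun k => if 12 * k + 13 > max_sum then [12 * k + 9] else [12 * k + 9, 12 * k + 13])

-- ===== PRECONDITION & SPEC =====
def Spec_twos (max_sum : Int) (out : List Int) : Prop := out = twos_alt max_sum
instance (max_sum : Int) (out : List Int) : Decidable (Spec_twos max_sum out) := by unfold Spec_twos; infer_instance

-- ===== CLAIM (what is proved, stated in full; the proofs are below) =====
def Claim_equal_twos : Prop := ∀ (max_sum : Int), Dom_twos max_sum → Spec_twos max_sum (twos max_sum)

-- ===== LEMMAS AND PROOFS =====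

-- the closed-form count n1 counts exactly the blocks whose first value 12k+9 still fits
lemma twos_count_iff (M k : Int) (hk : 0 ≤ k) :
    (k < (if M ≥ 9 then PySem.Int.floordiv (M - 9) 12 + 1 else 0)) ↔ 12 * k + 9 ≤ M := by
  split_ifs with h
  · have : k ≤ PySem.Int.floordiv (M - 9) 12 ↔ k * 12 ≤ M - 9 :=
      PySem.Int.le_floordiv_iff_mul_le (by omega)
    omega
  · omega

-- loop invariant: from state i = 12k+1 the loop emits exactly blocks k, k+1, …, n1-1
lemma twosLoopA_eq_blocks (M n1 : Int)
    (hn : ∀ k : Int, 0 ≤ k → (k < n1 ↔ 12 * k + 9 ≤ M)) :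
    ∀ (fuel : Nat) (k : Int), 0 ≤ k → (n1 - k).toNat = fuel →
      twosLoopA M (12 * k + 1) =
        (PySem.List.pyRange k n1 1).flatMap
          (fun k => if 12 * k + 13 > M then [12 * k + 9] else [12 * k + 9, 12 * k + 13]) := by
  intro fuel
  induction fuel with
  | zero =>
    intro k hk hf
    have hkn : n1 ≤ k := by omega
    have hM : ¬ (12 * k + 9 ≤ M) := by
      intro hle; exact absurd ((hn k hk).mpr hle) (by omega)
    rw [twosLoopA, PySem.List.pyRange_one_eq_nil hkn]
    split_ifs <;> simp_all <;> omega
  | succ f ih =>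
    intro k hk hf
    have hkn : k < n1 := by omega
    have hM : 12 * k + 9 ≤ M := (hn k hk).mp hkn
    rw [twosLoopA, PySem.List.pyRange_one_cons hkn]
    have h1 : 12 * k + 1 ≤ M := by omega
    rw [dif_pos h1, if_neg (by omega)]
    by_cases h2 : 12 * k + 1 + 8 + 4 > M
    · rw [if_pos h2]
      have hend : n1 ≤ k + 1 := by
        by_contra hc
        have := (hn (k + 1) (by omega)).mp (by omega)
        omega
      rw [PySem.List.pyRange_one_eq_nil hend]
      simp only [List.flatMap_nil, List.append_nil, List.flatMap_cons]
      rw [if_pos (by omega : 12 * k + 13 > M)]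
      norm_num
      omega
    · rw [if_neg h2]
      have : (12 : Int) * k + 1 + 8 + 4 = 12 * (k + 1) + 1 := by ring
      rw [this, ih (k + 1) (by omega) (by omega)]
      simp only [List.flatMap_cons]
      rw [if_neg (by omega : ¬ 12 * k + 13 > M)]
      norm_num
      constructor <;> ring

-- ===== VERDICT (by name: the statement is the Claim_ definition above) =====
theorem twos_spec : Claim_equal_twos := by
  intro M _
  unfold Spec_twos twos
  conv_lhs => rw [show (1 : Int) = 12 * 0 + 1 from by norm_num]
  rw [twosLoopA_eq_blocks M _ (fun k hk => twos_count_iff M k hk) _ 0 le_rfl rfl]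
  rfl
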